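-- pv_equiv track=rewrite | github.com/Vishv0407/ML_2025_4_Cluster_555 | pred.py | calculate_forbidden_transitions
-- ===== SOURCE A (Python) =====
-- from typing import List, Tuple
-- from typing import List, Tuple
--
-- def calculate_forbidden_transitions(zone_seq: List[int]) -> int:
--     forbidden_trans = 0
--     for i in range(1, len(zone_seq)):
--         # Direct transitions between entry/exit zones without circulating
--         if (zone_seq[i-1] in [2, 3, 4, 5] and zone_seq[i] in [2, 3, 4, 5] and
--             zone_seq[i-1] != zone_seq[i]):
--             recent_zones = zone_seq[max(0, i-5):i]
--             if not any(z == 1 for z in recent_zones):  # No circulation in recent steps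
--                 forbidden_trans += 1
--         # Penalize central island crossings unless at start/end (parking)
--         if zone_seq[i] == 0 and i > 0 and i < len(zone_seq) - 1:
--             forbidden_trans += 1
--     return forbidden_trans
-- ===== SOURCE B (Python) =====
-- def calculate_forbidden_transitions(zone_seq):
--     n = len(zone_seq)
--     # prefix[k] = number of 1s among zone_seq[:k]
--     prefix = [0]
--     ones = 0
--     for z in zone_seq:
--         ones += 1 if z == 1 else 0
--         prefix.append(ones)
--     trans = 0
--     for i in range(1, n):
--         a, b = zone_seq[i - 1], zone_seq[i]
--         if 2 <= a <= 5 and 2 <= b <= 5 and a != b: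
--             if prefix[i] - prefix[max(0, i - 5)] == 0:
--                 trans += 1
--     zeros = sum(1 for z in zone_seq[1:-1] if z == 0)
--     return trans + zeros
-- ===== Notes on version B (the rewrite author's own statement) =====
-- stated objective: alternative
-- what changed: Replaces A's per-transition rescan of the last-5 window (any over a fresh slice at every index) by a whole-sequence prefix table of counts of 1s queried as P[i]-P[max(0,i-5)]==0, and counts the interior zeros in a separate pass over zone_seq[1:-1] instead of inside the main loop.
import Mathlib
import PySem

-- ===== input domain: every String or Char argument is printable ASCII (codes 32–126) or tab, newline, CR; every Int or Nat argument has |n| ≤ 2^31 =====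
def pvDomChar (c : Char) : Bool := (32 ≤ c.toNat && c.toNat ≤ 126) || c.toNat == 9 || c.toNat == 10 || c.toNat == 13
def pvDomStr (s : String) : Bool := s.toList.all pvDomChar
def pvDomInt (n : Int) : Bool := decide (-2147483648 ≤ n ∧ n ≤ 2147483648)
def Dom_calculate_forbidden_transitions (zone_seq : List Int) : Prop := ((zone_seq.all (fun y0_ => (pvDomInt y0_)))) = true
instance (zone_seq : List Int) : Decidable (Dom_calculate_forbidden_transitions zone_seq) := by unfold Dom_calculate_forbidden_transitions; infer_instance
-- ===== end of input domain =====

-- B replaces A's per-transition rescan of the last-5 window by a whole-sequence prefix table of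
-- counts of 1s and counts the interior zeros separately over zone_seq[1:-1] (objective: alternative).

-- ===== PORT A =====
def calculate_forbidden_transitions (zone_seq : List Int) : Int :=
  (PySem.List.pyRange 1 (zone_seq.length : Int) 1).foldl (fun forbidden_trans i =>
    let prev := PySem.List.pyGetD zone_seq (i - 1) 0
    let cur := PySem.List.pyGetD zone_seq i 0
    let forbidden_trans :=
      if (prev = 2 ∨ prev = 3 ∨ prev = 4 ∨ prev = 5) ∧ (cur = 2 ∨ cur = 3 ∨ cur = 4 ∨ cur = 5)
          ∧ prev ≠ cur then
        let recent_zones := PySem.List.slice zone_seq (some (max 0 (i - 5))) (some i)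
        if ¬ (recent_zones.any (fun z => z == 1)) then forbidden_trans + 1 else forbidden_trans
      else forbidden_trans
    if cur = 0 ∧ 0 < i ∧ i < (zone_seq.length : Int) - 1 then forbidden_trans + 1
    else forbidden_trans) 0

-- ===== PORT B =====
def calculate_forbidden_transitions_alt (zone_seq : List Int) : Int :=
  let n : Int := zone_seq.length
  let pref := (zone_seq.foldl (fun (st : List Int × Int) z =>
      let ones := st.2 + (if z = 1 then 1 else 0)
      (st.1 ++ [ones], ones)) ([0], 0)).1
  let trans := (PySem.List.pyRange 1 n 1).foldl (fun trans i =>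
      let a := PySem.List.pyGetD zone_seq (i - 1) 0
      let b := PySem.List.pyGetD zone_seq i 0
      if (2 ≤ a ∧ a ≤ 5) ∧ (2 ≤ b ∧ b ≤ 5) ∧ a ≠ b then
        if PySem.List.pyGetD pref i 0 - PySem.List.pyGetD pref (max 0 (i - 5)) 0 = 0 then
          trans + 1
        else trans
      else trans) 0
  let zeros := ((PySem.List.slice zone_seq (some 1) (some (-1))).map
      (fun z => if z = 0 then (1 : Int) else 0)).sum
  trans + zeros

-- ===== PRECONDITION & SPEC =====
def Spec_calculate_forbidden_transitions (zone_seq : List Int) (out : Int) : Prop := out = calculate_forbidden_transitions_alt zone_seq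
instance (zone_seq : List Int) (out : Int) : Decidable (Spec_calculate_forbidden_transitions zone_seq out) := by unfold Spec_calculate_forbidden_transitions; infer_instance

-- ===== CLAIM (what is proved, stated in full; the proofs are below) =====
def Claim_equal_calculate_forbidden_transitions : Prop := ∀ (zone_seq : List Int), Dom_calculate_forbidden_transitions zone_seq → Spec_calculate_forbidden_transitions zone_seq (calculate_forbidden_transitions zone_seq)

-- ===== LEMMAS AND PROOFS =====


-- helper definitions for the proofs (addends of the two loops)
def pvCnt (l : List Int) : Int := (l.countP (fun z => z == 1) : Int)

def pvF : List Int × Int → Int → List Int × Int := fun st z =>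
  let ones := st.2 + (if z = 1 then 1 else 0)
  (st.1 ++ [ones], ones)

def pvTA (zs : List Int) (i : Int) : Int :=
  if (PySem.List.pyGetD zs (i-1) 0 = 2 ∨ PySem.List.pyGetD zs (i-1) 0 = 3 ∨
        PySem.List.pyGetD zs (i-1) 0 = 4 ∨ PySem.List.pyGetD zs (i-1) 0 = 5) ∧
      (PySem.List.pyGetD zs i 0 = 2 ∨ PySem.List.pyGetD zs i 0 = 3 ∨
        PySem.List.pyGetD zs i 0 = 4 ∨ PySem.List.pyGetD zs i 0 = 5) ∧
      PySem.List.pyGetD zs (i-1) 0 ≠ PySem.List.pyGetD zs i 0 then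
    (if ¬ ((PySem.List.slice zs (some (max 0 (i-5))) (some i)).any (fun z => z == 1)) then 1 else 0)
  else 0

def pvZA (zs : List Int) (i : Int) : Int :=
  if PySem.List.pyGetD zs i 0 = 0 ∧ 0 < i ∧ i < (zs.length : Int) - 1 then 1 else 0

def pvTB (zs : List Int) (i : Int) : Int :=
  if (2 ≤ PySem.List.pyGetD zs (i-1) 0 ∧ PySem.List.pyGetD zs (i-1) 0 ≤ 5) ∧
      (2 ≤ PySem.List.pyGetD zs i 0 ∧ PySem.List.pyGetD zs i 0 ≤ 5) ∧
      PySem.List.pyGetD zs (i-1) 0 ≠ PySem.List.pyGetD zs i 0 then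
    (if PySem.List.pyGetD ((zs.foldl pvF ([0], 0)).1) i 0
        - PySem.List.pyGetD ((zs.foldl pvF ([0], 0)).1) (max 0 (i-5)) 0 = 0 then 1 else 0)
  else 0

theorem pvCnt_cons (z : Int) (l : List Int) :
    pvCnt (z :: l) = (if z = 1 then 1 else 0) + pvCnt l := by
  by_cases h : z = 1 <;> simp [pvCnt, h]
  ring

theorem pv_pref_fold : ∀ (zs out : List Int) (c : Int),
    zs.foldl pvF (out, c)
      = (out ++ (List.range zs.length).map (fun k => c + pvCnt (zs.take (k+1))), c + pvCnt zs) := by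
  intro zs
  induction zs with
  | nil => intro out c; simp [pvCnt]
  | cons z zs ih =>
    intro out c
    have hf : pvF (out, c) z = (out ++ [c + (if z = 1 then 1 else 0)], c + (if z = 1 then 1 else 0)) := rfl
    simp only [List.foldl_cons, hf, ih, List.length_cons, List.range_succ_eq_map, List.map_cons,
      List.map_map, Prod.mk.injEq]
    refine ⟨?_, by rw [pvCnt_cons]; ring⟩
    rw [List.append_assoc]
    congr 1
    simp only [List.take_succ_cons, pvCnt_cons, List.singleton_append]
    congr 1
    · simp [pvCnt]
    · apply List.map_congr_left; intro k hk; simp [Function.comp]; ring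

theorem pv_pref_get_nat (zs : List Int) (k : Nat) (h : k ≤ zs.length)
    (hlt : k < ([0] ++ (List.range zs.length).map (fun j => pvCnt (zs.take (j+1)))).length) :
    ([0] ++ (List.range zs.length).map (fun j => pvCnt (zs.take (j+1))))[k] = pvCnt (zs.take k) := by
  cases k with
  | zero => simp [pvCnt]
  | succ k =>
    have hkn : k < zs.length := by omega
    simp

theorem pv_pref_get (zs : List Int) (i : Int) (h0 : 0 ≤ i) (h1 : i ≤ (zs.length : Int)) :
    PySem.List.pyGetD ((zs.foldl pvF ([0], 0)).1) i 0 = pvCnt (zs.take i.toNat) := by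
  rw [pv_pref_fold]
  simp only [zero_add]
  rw [PySem.List.pyGetD_eq_getElem _ 0 h0 (by simp; omega)]
  exact pv_pref_get_nat zs i.toNat (by omega) (by simp; omega)

theorem pv_window (zs : List Int) (i : Int) (h1 : 1 ≤ i) (h2 : i < (zs.length : Int)) :
    ((PySem.List.slice zs (some (max 0 (i-5))) (some i)).any (fun z => z == 1) = false)
      ↔ pvCnt (zs.take i.toNat) - pvCnt (zs.take (max 0 (i-5)).toNat) = 0 := by
  have ha : (0:Int) ≤ max 0 (i-5) := le_max_left _ _
  rw [PySem.List.slice_toNat zs ha (by omega)]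
  have hsplit : zs.take i.toNat
      = zs.take (max 0 (i-5)).toNat ++ (zs.drop (max 0 (i-5)).toNat).take (i.toNat - (max 0 (i-5)).toNat) := by
    rw [← List.take_add]
    congr 1
    omega
  rw [hsplit]
  simp only [pvCnt, List.countP_append]
  rw [List.any_eq_false]
  constructor
  · intro h
    have : ((zs.drop (max 0 (i-5)).toNat).take (i.toNat - (max 0 (i-5)).toNat)).countP (fun z => z == 1) = 0 :=
      List.countP_eq_zero.mpr (by simpa using h)
    omega
  · intro h x hx hx1
    have : ((zs.drop (max 0 (i-5)).toNat).take (i.toNat - (max 0 (i-5)).toNat)).countP (fun z => z == 1) = 0 := by omega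
    have := List.countP_eq_zero.mp this x hx
    simp_all

theorem pvT_eq (zs : List Int) (i : Int) (h1 : 1 ≤ i) (h2 : i < (zs.length : Int)) :
    pvTA zs i = pvTB zs i := by
  unfold pvTA pvTB
  rw [pv_pref_get zs i (by omega) (by omega),
      pv_pref_get zs (max 0 (i-5)) (le_max_left _ _) (by omega)]
  apply if_congr (by constructor <;> intro <;> omega) _ rfl
  apply if_congr _ rfl rfl
  rw [Bool.not_eq_true, pv_window zs i h1 h2]

theorem pvA_sum (zs : List Int) :
    calculate_forbidden_transitions zs
      = ((PySem.List.pyRange 1 (zs.length : Int) 1).map (fun i => pvTA zs i + pvZA zs i)).sum := by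
  unfold calculate_forbidden_transitions
  rw [PySem.List.foldl_congr_mem _ _ (fun acc i => acc + (pvTA zs i + pvZA zs i)) 0 ?_]
  · rw [PySem.List.foldl_add]; ring
  · intro acc i hi
    simp only [pvTA, pvZA]
    split_ifs <;> ring

theorem pvB_eq (zs : List Int) :
    calculate_forbidden_transitions_alt zs
      = ((PySem.List.pyRange 1 (zs.length : Int) 1).map (fun i => pvTB zs i)).sum
        + ((PySem.List.slice zs (some 1) (some (-1))).map (fun z => if z = 0 then (1:Int) else 0)).sum := by
  show ((PySem.List.pyRange 1 (zs.length : Int) 1).foldl (fun trans i =>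
      let a := PySem.List.pyGetD zs (i - 1) 0
      let b := PySem.List.pyGetD zs i 0
      if (2 ≤ a ∧ a ≤ 5) ∧ (2 ≤ b ∧ b ≤ 5) ∧ a ≠ b then
        if PySem.List.pyGetD ((zs.foldl pvF ([0], 0)).1) i 0
            - PySem.List.pyGetD ((zs.foldl pvF ([0], 0)).1) (max 0 (i - 5)) 0 = 0 then
          trans + 1
        else trans
      else trans) 0)
      + ((PySem.List.slice zs (some 1) (some (-1))).map (fun z => if z = 0 then (1:Int) else 0)).sum = _
  congr 1
  rw [PySem.List.foldl_congr_mem _ _ (fun acc i => acc + pvTB zs i) 0 ?_]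
  · rw [PySem.List.foldl_add]; ring
  · intro acc i hi
    simp only [pvTB]
    split_ifs <;> ring

theorem pv_slice_mid (zs : List Int) :
    PySem.List.slice zs (some 1) (some (-1)) = zs.dropLast.drop 1 := by
  cases zs with
  | nil => rfl
  | cons a t =>
    simp [PySem.List.slice, PySem.List.clampIdx, List.dropLast_eq_take, List.drop_take]
    split_ifs <;> omega


-- ===== VERDICT (by name: the statement is the Claim_ definition above) =====

theorem pvZ_sum (zs : List Int) :
    ((PySem.List.pyRange 1 (zs.length : Int) 1).map (fun i => pvZA zs i)).sum
      = ((PySem.List.slice zs (some 1) (some (-1))).map (fun z => if z = 0 then (1:Int) else 0)).sum := by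
  rw [pv_slice_mid]
  by_cases hn : (zs.length : Int) ≤ 1
  · rw [PySem.List.pyRange_one_eq_nil hn]
    have hnil : zs.dropLast.drop 1 = [] := by
      apply List.drop_eq_nil_of_le
      simp [List.length_dropLast]
      omega
    simp [hnil]
  · have hsing := PySem.List.pyRange_one_singleton ((zs.length : Int) - 1)
    rw [sub_add_cancel] at hsing
    rw [PySem.List.pyRange_one_append 1 ((zs.length : Int) - 1) _ (by omega) (by omega), hsing,
      List.map_append, List.sum_append]
    have hlast : pvZA zs ((zs.length : Int) - 1) = 0 := by
      unfold pvZA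
      rw [if_neg]
      rintro ⟨-, -, h⟩
      omega
    simp only [List.map_cons, List.map_nil, List.sum_cons, List.sum_nil, hlast, add_zero]
    have hmap : (PySem.List.pyRange 1 ((zs.length : Int) - 1) 1).map (fun i => pvZA zs i)
        = (PySem.List.pyRange 1 ((zs.length : Int) - 1) 1).map
            ((fun z => if z = 0 then (1:Int) else 0) ∘ (fun i => PySem.List.pyGetD zs.dropLast i 0)) := by
      apply List.map_congr_left
      intro i hi
      rw [PySem.List.mem_pyRange_one] at hi
      unfold pvZA
      have hget : PySem.List.pyGetD zs i 0 = PySem.List.pyGetD zs.dropLast i 0 := by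
        rw [PySem.List.pyGetD_eq_getElem _ 0 (by omega) (by omega),
            PySem.List.pyGetD_eq_getElem _ 0 (by omega) (by simp [List.length_dropLast]; omega)]
        rw [List.getElem_dropLast]
      rw [hget]
      simp only [Function.comp]
      by_cases hz : PySem.List.pyGetD zs.dropLast i 0 = 0
      · rw [if_pos ⟨hz, by omega, by omega⟩, if_pos hz]
      · rw [if_neg (fun h => hz h.1), if_neg hz]
    rw [hmap, ← List.map_map]
    have hlen : ((zs.length : Int) - 1) = PySem.List.len zs.dropLast := by
      simp [PySem.List.len, List.length_dropLast]
      omega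
    rw [hlen, PySem.List.map_pyGetD_pyRange zs.dropLast 0 (by omega)]
    norm_num

theorem calculate_forbidden_transitions_spec : Claim_equal_calculate_forbidden_transitions := by
  intro zs _
  unfold Spec_calculate_forbidden_transitions
  rw [pvA_sum, pvB_eq, PySem.List.sum_map_add_int, ← pvZ_sum]
  congr 1
  congr 1
  apply List.map_congr_left
  intro i hi
  rw [PySem.List.mem_pyRange_one] at hi
  exact pvT_eq zs i hi.1 hi.2
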